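-- pv_equiv track=rewrite | github.com/ElchiBey/ciphers.py | ciphers.py | decryptCaesarCipher
-- ===== SOURCE A (Python) =====
-- def decryptCaesarCipher(text, key1, key2):
--     result = ''
--
--     for i in range(len(text)):
--         if i % 2 == 0:
--             if 48 <= ord(text[i]) <= 57:
--                 if ord(text[i]) - key1 % 10 < 48:
--                     result += chr(58 - (48 - (ord(text[i]) - key1 % 10)))
--                 else:
--                     result += chr(ord(text[i]) - key1 % 10)
--             elif 65 <= ord(text[i]) <= 90:
--                 if ord(text[i]) - key1 % 26 < 65:
--                     result += chr(91 - (65 - (ord(text[i]) - key1 % 26)))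
--                 else:
--                     result += chr(ord(text[i]) - key1 % 26)
--             elif 97 <= ord(text[i]) <= 122:
--                 if ord(text[i]) - key1 % 26 < 97:
--                     result += chr(123 - (97 - (ord(text[i]) - key1 % 26)))
--                 else:
--                     result += chr(ord(text[i]) - key1 % 26)
--             else:
--                 result += text[i]
--         else:
--             if 48 <= ord(text[i]) <= 57:
--                 if ord(text[i]) - key2 % 10 < 48:
--                     result += chr(58 - (48 - (ord(text[i]) - key2 % 10)))
--                 else:
--                     result += chr(ord(text[i]) - key2 % 10)
--             elif 65 <= ord(text[i]) <= 90:
--                 if ord(text[i]) - key2 % 26 < 65: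
--                     result += chr(91 - (65 - (ord(text[i]) - key2 % 26)))
--                 else:
--                     result += chr(ord(text[i]) - key2 % 26)
--             elif 97 <= ord(text[i]) <= 122:
--                 if ord(text[i]) - key2 % 26 < 97:
--                     result += chr(123 - (97 - (ord(text[i]) - key2 % 26)))
--                 else:
--                     result += chr(ord(text[i]) - key2 % 26)
--             else:
--                 result += text[i]
--
--     return result
-- ===== SOURCE B (Python) =====
-- def _shift(c, key):
--     o = ord(c)
--     if 48 <= o < 58:
--         base, r = 48, 10
--     elif 65 <= o < 91:
--         base, r = 65, 26
--     elif 97 <= o < 123: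
--         base, r = 97, 26
--     else:
--         return c
--     return chr((o - base - key % r) % r + base)
--
--
-- def _deinterleave(s):
--     # split s into (chars at even positions, chars at odd positions)
--     e, o = [], []
--     while len(s) >= 2:
--         e.append(s[0])
--         o.append(s[1])
--         s = s[2:]
--     return ''.join(e) + s, ''.join(o)
--
--
-- def _interleave(a, b):
--     # merge back, taking alternately from a then b
--     out = []
--     while a:
--         out.append(a[0])
--         a, b = b, a[1:]
--     return ''.join(out) + b
--
--
-- def decryptCaesarCipher(text, key1, key2):
--     evens, odds = _deinterleave(text)
--     return _interleave(''.join(_shift(c, key1) for c in evens),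
--                        ''.join(_shift(c, key2) for c in odds))
-- ===== Notes on version B (the rewrite author's own statement) =====
-- stated objective: alternative
-- what changed: Instead of A's single indexed pass that tests index parity and duplicates six branch-and-correct blocks, B deinterleaves the text into even- and odd-position halves, shifts each half wholesale with one modular helper, and re-interleaves the two results with an argument-swapping merge loop.
import Mathlib
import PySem

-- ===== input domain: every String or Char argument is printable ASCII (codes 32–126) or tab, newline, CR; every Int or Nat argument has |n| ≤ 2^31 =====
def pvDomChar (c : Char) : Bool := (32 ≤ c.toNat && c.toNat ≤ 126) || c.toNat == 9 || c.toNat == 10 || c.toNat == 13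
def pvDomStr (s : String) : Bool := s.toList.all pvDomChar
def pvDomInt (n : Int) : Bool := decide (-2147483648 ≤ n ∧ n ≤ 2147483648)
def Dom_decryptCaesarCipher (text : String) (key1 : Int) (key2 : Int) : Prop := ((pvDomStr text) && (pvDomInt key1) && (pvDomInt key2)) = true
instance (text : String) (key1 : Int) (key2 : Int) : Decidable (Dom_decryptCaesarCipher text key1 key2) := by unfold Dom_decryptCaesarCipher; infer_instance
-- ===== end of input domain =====

-- B replaces A's single indexed parity-testing pass (six duplicated branch-and-correct blocks)
-- by staged passes: recursively deinterleave into even/odd halves, shift each half with one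
-- modular helper, recursively re-interleave (objective: alternative; same cost).

-- ===== PORT A =====
-- the character A's branch for key `key` appends for character c (A's six blocks, verbatim)
def aChar (key : Int) (c : Char) : Char :=
  let o : Int := (c.toNat : Int)
  if 48 ≤ o ∧ o ≤ 57 then
    if o - PySem.Int.mod key 10 < 48 then Char.ofNat (58 - (48 - (o - PySem.Int.mod key 10))).toNat
    else Char.ofNat (o - PySem.Int.mod key 10).toNat
  else if 65 ≤ o ∧ o ≤ 90 then
    if o - PySem.Int.mod key 26 < 65 then Char.ofNat (91 - (65 - (o - PySem.Int.mod key 26))).toNat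
    else Char.ofNat (o - PySem.Int.mod key 26).toNat
  else if 97 ≤ o ∧ o ≤ 122 then
    if o - PySem.Int.mod key 26 < 97 then Char.ofNat (123 - (97 - (o - PySem.Int.mod key 26))).toNat
    else Char.ofNat (o - PySem.Int.mod key 26).toNat
  else c

def decryptCaesarCipher (text : String) (key1 : Int) (key2 : Int) : String :=
  String.ofList ((PySem.List.enumerate text.toList 0).foldl
    (fun result p =>
      if PySem.Int.mod p.1 2 = 0 then result ++ [aChar key1 p.2]
      else result ++ [aChar key2 p.2]) [])

-- ===== PORT B =====
-- Source B's _shift: classify c into (base, r) and apply one modular formula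
def bShift (c : Char) (key : Int) : Char :=
  let o : Int := c.toNat
  if 48 ≤ o ∧ o < 58 then
    Char.ofNat (PySem.Int.mod (o - 48 - PySem.Int.mod key 10) 10 + 48).toNat
  else if 65 ≤ o ∧ o < 91 then
    Char.ofNat (PySem.Int.mod (o - 65 - PySem.Int.mod key 26) 26 + 65).toNat
  else if 97 ≤ o ∧ o < 123 then
    Char.ofNat (PySem.Int.mod (o - 97 - PySem.Int.mod key 26) 26 + 97).toNat
  else c

-- Source B's _deinterleave loop: accumulators e,o; s[2:] on the char list is List.drop 2 (exact here)
def bDeinterLoop (e o s : List Char) : List Char × List Char :=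
  match s with
  | a :: b :: t => bDeinterLoop (e ++ [a]) (o ++ [b]) t
  | _ => (e ++ s, o)

-- Source B's _interleave loop: the step swaps a and b as the Python does; a[1:] is List.tail
def bInterLoop (out a b : List Char) : List Char :=
  match a with
  | [] => out ++ b
  | x :: a' => bInterLoop (out ++ [x]) b a'
termination_by a.length + b.length
decreasing_by simp; omega

def decryptCaesarCipher_alt (text : String) (key1 : Int) (key2 : Int) : String :=
  let p := bDeinterLoop [] [] text.toList
  String.ofList (bInterLoop [] (p.1.map (fun c => bShift c key1))
                               (p.2.map (fun c => bShift c key2)))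

-- ===== PRECONDITION & SPEC =====
def Spec_decryptCaesarCipher (text : String) (key1 : Int) (key2 : Int) (out : String) : Prop := out = decryptCaesarCipher_alt text key1 key2
instance (text : String) (key1 : Int) (key2 : Int) (out : String) : Decidable (Spec_decryptCaesarCipher text key1 key2 out) := by unfold Spec_decryptCaesarCipher; infer_instance

-- ===== CLAIM (what is proved, stated in full; the proofs are below) =====
def Claim_equal_decryptCaesarCipher : Prop := ∀ (text : String) (key1 : Int) (key2 : Int), Dom_decryptCaesarCipher text key1 key2 → Spec_decryptCaesarCipher text key1 key2 (decryptCaesarCipher text key1 key2)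

-- ===== LEMMAS AND PROOFS =====

-- proof-only structural versions of the two loops, and their accumulator characterisations
def dei : List Char → List Char × List Char
  | [] => ([], [])
  | [a] => ([a], [])
  | a :: b :: t =>
      let p := dei t
      (a :: p.1, b :: p.2)

def itl : List Char → List Char → List Char
  | [], b => b
  | a :: as_, b => a :: itl b as_
termination_by a b => a.length + b.length
decreasing_by simp; omega

lemma bDeinterLoop_eq (s : List Char) : ∀ e o, bDeinterLoop e o s = (e ++ (dei s).1, o ++ (dei s).2) := by
  induction s using dei.induct with
  | case1 => intro e o; simp [bDeinterLoop, dei]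
  | case2 a => intro e o; simp [bDeinterLoop, dei]
  | case3 a b t ih =>
      intro e o
      simp only [bDeinterLoop, dei, ih, List.append_assoc, List.singleton_append]

lemma bInterLoop_eq (a b : List Char) : ∀ out, bInterLoop out a b = out ++ itl a b := by
  induction a, b using itl.induct with
  | case1 b => intro out; simp [bInterLoop, itl]
  | case2 x a' b ih =>
      intro out
      simp only [bInterLoop, itl, ih, List.append_assoc, List.singleton_append]

-- per-character agreement: A's branch-and-correct char equals B's modular shift, for every char and key
lemma aChar_eq_bShift (key : Int) (c : Char) : aChar key c = bShift c key := by
  unfold aChar bShift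
  have e10 : ∀ a : Int, PySem.Int.mod a 10 = a % 10 :=
    fun a => PySem.Int.mod_eq_emod_of_pos (by norm_num)
  have e26 : ∀ a : Int, PySem.Int.mod a 26 = a % 26 :=
    fun a => PySem.Int.mod_eq_emod_of_pos (by norm_num)
  simp only [e10, e26]
  split_ifs <;> first
    | rfl
    | (congr 1; omega)

-- the core staged-vs-indexed lemma: mapping the parity-selected shift over an enumeration
-- starting at any EVEN index equals deinterleave → map each half → interleave
lemma map_enumerate_eq_interleave (k1 k2 : Int) :
    ∀ (xs : List Char) (n : Int), PySem.Int.mod n 2 = 0 →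
    (PySem.List.enumerate xs n).map
        (fun p => if PySem.Int.mod p.1 2 = 0 then aChar k1 p.2 else aChar k2 p.2)
      = itl ((dei xs).1.map (fun c => bShift c k1)) ((dei xs).2.map (fun c => bShift c k2)) := by
  intro xs
  induction xs using dei.induct with
  | case1 =>
      intro n _
      simp [PySem.List.enumerate_nil, dei, itl]
  | case2 a =>
      intro n hn
      rw [PySem.Int.mod_eq_emod_of_pos (by norm_num : (0:Int) < 2)] at hn
      simp [PySem.List.enumerate_cons, PySem.List.enumerate_nil, dei, itl,
        hn, aChar_eq_bShift, PySem.Int.mod_eq_emod_of_pos]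
  | case3 a b t ih =>
      intro n hn
      have hmod : ∀ m : Int, PySem.Int.mod m 2 = m % 2 :=
        fun m => PySem.Int.mod_eq_emod_of_pos (by norm_num)
      have hn1 : ¬ PySem.Int.mod (n + 1) 2 = 0 := by
        rw [hmod] at *; omega
      have hn2 : PySem.Int.mod (n + 2) 2 = 0 := by
        rw [hmod] at *; omega
      have ih' := ih (n + 2) hn2
      simp only [PySem.List.enumerate_cons, List.map_cons, hn, hn1, if_pos,
        dei, List.map_cons]
      rw [show n + 1 + 1 = n + 2 by ring, ih']
      simp [itl, aChar_eq_bShift]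

lemma step_eq (key1 key2 : Int) (result : List Char) (p : Int × Char) :
    (if PySem.Int.mod p.1 2 = 0 then result ++ [aChar key1 p.2]
     else result ++ [aChar key2 p.2])
    = result ++ [if PySem.Int.mod p.1 2 = 0 then aChar key1 p.2 else aChar key2 p.2] := by
  split_ifs <;> rfl

-- ===== VERDICT (by name: the statement is the Claim_ definition above) =====
theorem decryptCaesarCipher_spec : Claim_equal_decryptCaesarCipher := by
  intro text key1 key2 _
  unfold Spec_decryptCaesarCipher decryptCaesarCipher decryptCaesarCipher_alt
  congr 1
  have hstep : (fun (result : List Char) (p : Int × Char) =>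
      if PySem.Int.mod p.1 2 = 0 then result ++ [aChar key1 p.2]
      else result ++ [aChar key2 p.2])
      = (fun result p =>
        result ++ [if PySem.Int.mod p.1 2 = 0 then aChar key1 p.2 else aChar key2 p.2]) := by
    funext result p
    exact step_eq key1 key2 result p
  rw [hstep, PySem.List.foldl_append_singleton_eq_map, bDeinterLoop_eq, bInterLoop_eq]
  simpa using map_enumerate_eq_interleave key1 key2 text.toList 0 (by decide)
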